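-- pv_equiv track=rewrite | github.com/littlemex/aws-samples | workshops/ai-coding-workshop/cline/scripts/port_forward.py | prioritize_ports
-- ===== SOURCE A (Python) =====
-- from typing import List, Dict, Any
--
-- def prioritize_ports(port_configs: List[Dict[str, int]]) -> List[Dict[str, int]]:
--     """
--     ポート設定を優先順位付けする
--     SSHポート(22)を最優先にする
--     """
--     ssh_ports = []
--     other_ports = []
--
--     for port_config in port_configs:
--         if port_config['remote'] == 22:
--             ssh_ports.append(port_config)
--         else:
--             other_ports.append(port_config)
--
--     return ssh_ports + other_ports
-- ===== SOURCE B (Python) =====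
-- def prioritize_ports(port_configs):
--     """
--     ポート設定を優先順位付けする
--     SSHポート(22)を最優先にする
--     """
--     return sorted(port_configs, key=lambda c: 0 if c['remote'] == 22 else 1)
-- ===== Notes on version B (the rewrite author's own statement) =====
-- stated objective: idiomatic
-- what changed: Replaces the explicit two-accumulator partition loop with a single stable sort on a 0/1 key (0 for remote==22), relying on sort stability to preserve each group's order.
import Mathlib
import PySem

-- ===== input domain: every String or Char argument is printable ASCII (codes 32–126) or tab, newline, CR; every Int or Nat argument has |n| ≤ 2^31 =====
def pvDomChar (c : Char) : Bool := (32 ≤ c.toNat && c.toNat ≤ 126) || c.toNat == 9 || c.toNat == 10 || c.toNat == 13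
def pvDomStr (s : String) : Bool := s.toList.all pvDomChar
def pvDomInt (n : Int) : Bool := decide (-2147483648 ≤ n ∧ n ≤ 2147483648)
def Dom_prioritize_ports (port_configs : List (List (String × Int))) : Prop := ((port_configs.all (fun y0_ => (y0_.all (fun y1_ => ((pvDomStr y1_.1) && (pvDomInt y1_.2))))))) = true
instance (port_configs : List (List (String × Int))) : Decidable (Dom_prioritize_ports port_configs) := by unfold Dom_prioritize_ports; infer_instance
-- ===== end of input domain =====

-- B replaces A's two-list partition loop with one stable key-sort (0 for remote==22, else 1); idiomatic, not faster.

-- ===== PORT A =====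
-- A: loop appending each config to ssh_ports or other_ports, return ssh_ports ++ other_ports.
def prioritize_ports (port_configs : List (List (String × Int))) : List (List (String × Int)) :=
  let st := port_configs.foldl
    (fun (acc : List (List (String × Int)) × List (List (String × Int))) port_config =>
      if port_config.lookup "remote" = some 22 then (acc.1 ++ [port_config], acc.2)
      else (acc.1, acc.2 ++ [port_config]))
    ([], [])
  st.1 ++ st.2

-- ===== PORT B =====
-- B: sorted(port_configs, key=lambda c: 0 if c['remote'] == 22 else 1) — stable sort with a 0/1 key.
def prioritize_ports_alt (port_configs : List (List (String × Int))) : List (List (String × Int)) :=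
  PySem.List.sorted port_configs
    (fun c => if c.lookup "remote" = some 22 then (0 : Int) else 1) false

-- ===== PRECONDITION & SPEC =====
-- Pre_ excludes configs missing the 'remote' key: there both Pythons raise KeyError.
def Pre_prioritize_ports (port_configs : List (List (String × Int))) : Prop :=
  ∀ c ∈ port_configs, (c.lookup "remote").isSome = true
instance (port_configs : List (List (String × Int))) : Decidable (Pre_prioritize_ports port_configs) := by unfold Pre_prioritize_ports; infer_instance

def pvWitness_prioritize_ports : (List (List (String × Int))) :=
  ([[("remote", 80), ("local", 8080)], [("remote", 22)], [("remote", 443)], [("remote", 22), ("local", 2222)]])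

def Spec_prioritize_ports (port_configs : List (List (String × Int))) (out : List (List (String × Int))) : Prop := out = prioritize_ports_alt port_configs
instance (port_configs : List (List (String × Int))) (out : List (List (String × Int))) : Decidable (Spec_prioritize_ports port_configs out) := by unfold Spec_prioritize_ports; infer_instance

-- ===== CLAIM (what is proved, stated in full; the proofs are below) =====
def Claim_equal_prioritize_ports : Prop := ∀ (port_configs : List (List (String × Int))), Dom_prioritize_ports port_configs → Pre_prioritize_ports port_configs → Spec_prioritize_ports port_configs (prioritize_ports port_configs)

-- ===== LEMMAS AND PROOFS =====

-- the 0/1 key of B, abbreviated for the lemmas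
def pvKey (c : List (String × Int)) : Int := if c.lookup "remote" = some 22 then 0 else 1

-- an element with key 0 inserted into (ssh ++ other) lands between the two groups
theorem pv_insert_ssh (x : List (String × Int)) (s o : List (List (String × Int)))
    (hs : ∀ y ∈ s, pvKey y = 0) (ho : ∀ y ∈ o, pvKey y = 1) (hx : pvKey x = 0) :
    PySem.List.insertBy (fun a b => decide (pvKey a < pvKey b)) x (s ++ o) = s ++ x :: o := by
  induction s with
  | nil =>
    cases o with
    | nil => simp [PySem.List.insertBy]
    | cons y ys =>
      have hy := ho y (by simp)
      simp [PySem.List.insertBy, hx, hy]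
  | cons y ys ih =>
    have hy := hs y (by simp)
    have : ¬ (pvKey x < pvKey y) := by omega
    simp [PySem.List.insertBy, this]
    exact ih (fun z hz => hs z (by simp [hz]))

-- an element with key 1 inserted into a list of keys ≤ 1 goes to the end
theorem pv_insert_other (x : List (String × Int)) (l : List (List (String × Int)))
    (hl : ∀ y ∈ l, pvKey y ≤ 1) (hx : pvKey x = 1) :
    PySem.List.insertBy (fun a b => decide (pvKey a < pvKey b)) x l = l ++ [x] := by
  induction l with
  | nil => simp [PySem.List.insertBy]
  | cons y ys ih =>
    have hy := hl y (by simp)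
    have : ¬ (pvKey x < pvKey y) := by omega
    simp [PySem.List.insertBy, this]
    exact ih (fun z hz => hl z (by simp [hz]))

-- loop invariant: the insertion-sort fold over xs starting from s ++ o equals
-- A's two-accumulator fold starting from (s, o), joined by ++.
theorem pv_inv (xs : List (List (String × Int))) :
    ∀ (s o : List (List (String × Int))),
    (∀ y ∈ s, pvKey y = 0) → (∀ y ∈ o, pvKey y = 1) →
    xs.foldl (fun acc x => PySem.List.insertBy (fun a b => decide (pvKey a < pvKey b)) x acc) (s ++ o)
      = (xs.foldl
          (fun (acc : List (List (String × Int)) × List (List (String × Int))) c =>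
            if c.lookup "remote" = some 22 then (acc.1 ++ [c], acc.2) else (acc.1, acc.2 ++ [c]))
          (s, o)).1
        ++ (xs.foldl
          (fun (acc : List (List (String × Int)) × List (List (String × Int))) c =>
            if c.lookup "remote" = some 22 then (acc.1 ++ [c], acc.2) else (acc.1, acc.2 ++ [c]))
          (s, o)).2 := by
  induction xs with
  | nil => intro s o _ _; simp
  | cons x xs ih =>
    intro s o hs ho
    by_cases hx : x.lookup "remote" = some 22
    · have hk : pvKey x = 0 := by simp [pvKey, hx]
      have h1 : PySem.List.insertBy (fun a b => decide (pvKey a < pvKey b)) x (s ++ o) = (s ++ [x]) ++ o := by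
        rw [pv_insert_ssh x s o hs ho hk]; simp
      simp only [List.foldl_cons, hx, if_pos, h1]
      exact ih (s ++ [x]) o
        (fun y hy => by rcases List.mem_append.mp hy with h | h
                        · exact hs y h
                        · simp at h; simp [h, hk])
        ho
    · have hk : pvKey x = 1 := by simp [pvKey, hx]
      have h1 : PySem.List.insertBy (fun a b => decide (pvKey a < pvKey b)) x (s ++ o) = s ++ (o ++ [x]) := by
        rw [pv_insert_other x (s ++ o) (fun y hy => by
              rcases List.mem_append.mp hy with h | h
              · simp [hs y h]
              · simp [ho y h]) hk]
        simp
      simp only [List.foldl_cons, hx, h1]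
      · exact ih s (o ++ [x]) hs
          (fun y hy => by rcases List.mem_append.mp hy with h | h
                          · exact ho y h
                          · simp at h; simp [h, hk])

-- ===== VERDICT (by name: the statement is the Claim_ definition above) =====
theorem prioritize_ports_spec : Claim_equal_prioritize_ports := by
  intro port_configs _ _
  unfold Spec_prioritize_ports prioritize_ports prioritize_ports_alt PySem.List.sorted
  simp only [if_neg (by decide : ¬ (false = true))]
  have := pv_inv port_configs [] [] (by simp) (by simp)
  simpa [pvKey] using this.symm
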